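-- pv_equiv track=rewrite | github.com/igorjplino/PythonSolutionsExercises | Chapter1/Creativity/c1.14.py | check_distinct_odd
-- ===== SOURCE A (Python) =====
-- def check_distinct_odd(lst):
--     odd_numbers = set()
--     for l in lst:
--         if l % 2 != 0:
--             odd_numbers.add(l)
--             if len(odd_numbers) > 1:
--                 return True
--     return False
-- ===== SOURCE B (Python) =====
-- def check_distinct_odd(lst):
--     odds = [l for l in lst if l % 2 != 0]
--     return bool(odds) and min(odds) != max(odds)
-- ===== Notes on version B (the rewrite author's own statement) =====
-- stated objective: alternative
-- what changed: Replaces the early-exit loop growing a set with a declarative two-stage computation: filter the odd values, then decide by comparing their minimum and maximum (two distinct odd values exist iff min(odds) != max(odds)); no set, no early return.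
import Mathlib
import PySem

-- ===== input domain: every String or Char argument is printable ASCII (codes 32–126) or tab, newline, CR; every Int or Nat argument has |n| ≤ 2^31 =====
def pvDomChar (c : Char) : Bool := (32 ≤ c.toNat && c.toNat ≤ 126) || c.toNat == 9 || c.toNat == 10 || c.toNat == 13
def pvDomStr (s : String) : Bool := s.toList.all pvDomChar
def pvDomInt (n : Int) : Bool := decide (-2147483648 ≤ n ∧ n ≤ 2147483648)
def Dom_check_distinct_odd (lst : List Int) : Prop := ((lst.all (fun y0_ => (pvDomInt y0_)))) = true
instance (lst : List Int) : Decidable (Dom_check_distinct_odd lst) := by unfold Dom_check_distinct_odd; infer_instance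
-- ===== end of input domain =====

-- B replaces the early-exit loop over a growing set by a filter of the odd values followed by a min/max comparison (objective: alternative).

-- ===== PORT A =====
-- loop over lst carrying the set of odd numbers seen so far; early-return True when its size exceeds 1
def checkLoopA (s : PySem.Set Int) (rest : List Int) : Bool :=
  match rest with
  | [] => false
  | l :: rest' =>
      if PySem.Int.mod l 2 ≠ 0 then
        let s' := PySem.Set.add s l
        if PySem.Set.len s' > 1 then true else checkLoopA s' rest'
      else checkLoopA s rest'

def check_distinct_odd (lst : List Int) : Bool :=
  checkLoopA PySem.Set.empty lst

-- ===== PORT B =====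
-- odds = [l for l in lst if l % 2 != 0]; return bool(odds) and min(odds) != max(odds)
def check_distinct_odd_alt (lst : List Int) : Bool :=
  let odds := lst.filter (fun l => decide (PySem.Int.mod l 2 ≠ 0))
  match PySem.List.min? odds (fun x => x), PySem.List.max? odds (fun x => x) with
  | some m, some M => decide (m ≠ M)
  | _, _ => false

-- ===== PRECONDITION & SPEC =====
def Spec_check_distinct_odd (lst : List Int) (out : Bool) : Prop := out = check_distinct_odd_alt lst
instance (lst : List Int) (out : Bool) : Decidable (Spec_check_distinct_odd lst out) := by unfold Spec_check_distinct_odd; infer_instance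

-- ===== CLAIM (what is proved, stated in full; the proofs are below) =====
def Claim_equal_check_distinct_odd : Prop := ∀ (lst : List Int), Dom_check_distinct_odd lst → Spec_check_distinct_odd lst (check_distinct_odd lst)

-- ===== LEMMAS AND PROOFS =====

-- A's loop once the set holds exactly one element a: true iff some later odd value differs from a
theorem checkLoopA_one (rest : List Int) : ∀ (a : Int),
    (checkLoopA [a] rest = true ↔ ∃ x ∈ rest, PySem.Int.mod x 2 ≠ 0 ∧ x ≠ a) := by
  induction rest with
  | nil => intro a; simp [checkLoopA]
  | cons l rest' ih =>
      intro a
      by_cases hodd : PySem.Int.mod l 2 ≠ 0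
      · by_cases hla : l = a
        · subst hla
          have hadd : PySem.Set.add ([l] : PySem.Set Int) l = [l] :=
            PySem.Set.add_of_mem (by simp)
          simp only [checkLoopA, if_pos hodd, hadd]
          have h1 : ¬ (PySem.Set.len ([l] : PySem.Set Int) > 1) := by simp [PySem.Set.len]
          rw [if_neg h1, ih l]
          constructor
          · rintro ⟨x, hx, h2, h3⟩; exact ⟨x, List.mem_cons_of_mem _ hx, h2, h3⟩
          · rintro ⟨x, hx, h2, h3⟩
            rcases List.mem_cons.mp hx with rfl | hx'
            · exact absurd rfl h3
            · exact ⟨x, hx', h2, h3⟩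
        · have hadd : PySem.Set.add ([a] : PySem.Set Int) l = [a, l] :=
            PySem.Set.add_of_not_mem (by simp [hla])
          simp only [checkLoopA, if_pos hodd, hadd]
          have h1 : PySem.Set.len ([a, l] : PySem.Set Int) > 1 := by simp [PySem.Set.len]
          rw [if_pos h1]
          simp only [true_iff]
          exact ⟨l, List.mem_cons_self, hodd, hla⟩
      · simp only [checkLoopA, if_neg hodd]
        rw [ih a]
        constructor
        · rintro ⟨x, hx, h2, h3⟩; exact ⟨x, List.mem_cons_of_mem _ hx, h2, h3⟩
        · rintro ⟨x, hx, h2, h3⟩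
          rcases List.mem_cons.mp hx with rfl | hx'
          · exact absurd h2 hodd
          · exact ⟨x, hx', h2, h3⟩

-- A is true iff the list contains two distinct odd values
theorem checkA_iff (lst : List Int) :
    (check_distinct_odd lst = true ↔
      ∃ a ∈ lst, PySem.Int.mod a 2 ≠ 0 ∧ ∃ x ∈ lst, PySem.Int.mod x 2 ≠ 0 ∧ x ≠ a) := by
  unfold check_distinct_odd
  induction lst with
  | nil => simp [checkLoopA]
  | cons l rest ih =>
      by_cases hodd : PySem.Int.mod l 2 ≠ 0
      · have hadd : PySem.Set.add (PySem.Set.empty : PySem.Set Int) l = [l] := rfl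
        show (checkLoopA PySem.Set.empty (l :: rest) = true ↔ _)
        simp only [checkLoopA, if_pos hodd, hadd]
        have h1 : ¬ (PySem.Set.len ([l] : PySem.Set Int) > 1) := by simp [PySem.Set.len]
        rw [if_neg h1, checkLoopA_one rest l]
        constructor
        · rintro ⟨x, hx, h2, h3⟩
          exact ⟨l, List.mem_cons_self, hodd,
                 x, List.mem_cons_of_mem _ hx, h2, h3⟩
        · rintro ⟨a, ha, ha2, x, hx, h2, h3⟩
          rcases List.mem_cons.mp ha with rfl | ha'
          · rcases List.mem_cons.mp hx with rfl | hx'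
            · exact absurd rfl h3
            · exact ⟨x, hx', h2, h3⟩
          · rcases List.mem_cons.mp hx with rfl | hx'
            · exact ⟨a, ha', ha2, fun h => h3 h.symm⟩
            · by_cases hxl : x = l
              · subst hxl; exact ⟨a, ha', ha2, fun h => h3 h.symm⟩
              · exact ⟨x, hx', h2, hxl⟩
      · show (checkLoopA PySem.Set.empty (l :: rest) = true ↔ _)
        simp only [checkLoopA, if_neg hodd]
        rw [ih]
        constructor
        · rintro ⟨a, ha, ha2, x, hx, h2, h3⟩
          exact ⟨a, List.mem_cons_of_mem _ ha, ha2,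
                 x, List.mem_cons_of_mem _ hx, h2, h3⟩
        · rintro ⟨a, ha, ha2, x, hx, h2, h3⟩
          rcases List.mem_cons.mp ha with rfl | ha'
          · exact absurd ha2 hodd
          · rcases List.mem_cons.mp hx with rfl | hx'
            · exact absurd h2 hodd
            · exact ⟨a, ha', ha2, x, hx', h2, h3⟩

-- B is true iff the list contains two distinct odd values
theorem checkB_iff (lst : List Int) :
    (check_distinct_odd_alt lst = true ↔
      ∃ a ∈ lst, PySem.Int.mod a 2 ≠ 0 ∧ ∃ x ∈ lst, PySem.Int.mod x 2 ≠ 0 ∧ x ≠ a) := by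
  unfold check_distinct_odd_alt
  set odds := lst.filter (fun l => decide (PySem.Int.mod l 2 ≠ 0)) with hodds
  have hmem : ∀ x, x ∈ odds ↔ x ∈ lst ∧ PySem.Int.mod x 2 ≠ 0 := by
    intro x; simp [hodds, List.mem_filter]
  cases hm : PySem.List.min? odds (fun x => x) with
  | none =>
      have hnil : odds = [] := by rwa [PySem.List.min?_eq_none_iff] at hm
      have hM : PySem.List.max? odds (fun x => x) = none := by
        rw [PySem.List.max?_eq_none_iff]; exact hnil
      simp only [hm, hM]
      simp only [Bool.false_eq_true, false_iff]
      rintro ⟨a, ha, ha2, _⟩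
      have : a ∈ odds := (hmem a).mpr ⟨ha, ha2⟩
      simp [hnil] at this
  | some m =>
      cases hM : PySem.List.max? odds (fun x => x) with
      | none =>
          have hnil : odds = [] := by rwa [PySem.List.max?_eq_none_iff] at hM
          have : m ∈ odds := PySem.List.min?_mem hm
          rw [hnil] at this
          exact absurd this (by simp)
      | some M =>
          simp only [hm, hM]
          simp only [decide_eq_true_eq]
          constructor
          · intro hne
            have hmm := (hmem m).mp (PySem.List.min?_mem hm)
            have hMM := (hmem M).mp (PySem.List.max?_mem hM)
            exact ⟨m, hmm.1, hmm.2, M, hMM.1, hMM.2, fun h => hne h.symm⟩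
          · rintro ⟨a, ha, ha2, x, hx, h2, h3⟩ heq
            have hao : a ∈ odds := (hmem a).mpr ⟨ha, ha2⟩
            have hxo : x ∈ odds := (hmem x).mpr ⟨hx, h2⟩
            have h4 := PySem.List.min?_isMin hm a hao
            have h5 := PySem.List.max?_isMax hM a hao
            have h6 := PySem.List.min?_isMin hm x hxo
            have h7 := PySem.List.max?_isMax hM x hxo
            apply h3
            omega

-- ===== VERDICT (by name: the statement is the Claim_ definition above) =====
theorem check_distinct_odd_spec : Claim_equal_check_distinct_odd := by
  intro lst _
  unfold Spec_check_distinct_odd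
  have := (checkA_iff lst).trans (checkB_iff lst).symm
  cases hA : check_distinct_odd lst <;> cases hB : check_distinct_odd_alt lst <;>
    simp_all
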